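-- pv_equiv track=rewrite | github.com/Dinesh-manickan/Search-Engine | app/model/BigramIndex.py | BigramIndexBuilder
-- ===== SOURCE A (Python) =====
-- def BigramIndexBuilder(text, k=2):
--     kgrams = {}
--     for word in text:
--         for i in range(len(word) - k + 1):
--             Bigram = word[i:i+k]
--             if Bigram not in kgrams.keys():
--                 kgrams[Bigram]=[]
--
--             if word not in kgrams[Bigram]:
--                 kgrams[Bigram].append(word)
--
--     return kgrams
-- ===== SOURCE B (Python) =====
-- def BigramIndexBuilder(text, k=2):
--     # Two-pass decomposition: dedup words in first-appearance order, then index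
--     # each unique word's first-occurrence-ordered distinct k-grams with
--     # setdefault+append (no per-bigram membership scan).
--     seen = set()
--     unique_words = []
--     for word in text:
--         if word not in seen:
--             seen.add(word)
--             unique_words.append(word)
--     kgrams = {}
--     for word in unique_words:
--         grams = dict.fromkeys(word[i:i+k] for i in range(len(word) - k + 1))
--         for bigram in grams:
--             lst = kgrams.setdefault(bigram, [])
--             lst.append(word)
--     return kgrams
-- ===== Notes on version B (the rewrite author's own statement) =====
-- stated objective: alternative
-- what changed: A interleaves dict-key creation and a per-position 'word not in kgrams[bigram]' list scan inside one nested loop over all of text; B is a two-pass decomposition: it first dedups the words in first-appearance order with a seen-set, then for each unique word iterates its first-occurrence-ordered distinct k-grams (dict.fromkeys) and does a single setdefault+append with no membership scan.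
import Mathlib
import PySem

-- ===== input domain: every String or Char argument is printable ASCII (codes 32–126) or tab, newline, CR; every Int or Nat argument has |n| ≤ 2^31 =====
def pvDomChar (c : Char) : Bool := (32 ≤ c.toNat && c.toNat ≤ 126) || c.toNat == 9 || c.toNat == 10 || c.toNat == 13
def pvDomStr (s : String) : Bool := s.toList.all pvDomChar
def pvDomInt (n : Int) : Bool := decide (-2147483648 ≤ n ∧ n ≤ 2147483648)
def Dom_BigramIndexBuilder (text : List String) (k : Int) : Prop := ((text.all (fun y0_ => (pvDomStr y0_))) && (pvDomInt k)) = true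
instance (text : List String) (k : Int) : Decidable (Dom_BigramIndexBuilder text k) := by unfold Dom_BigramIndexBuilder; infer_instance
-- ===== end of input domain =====

-- B replaces A's per-position membership scan with a two-pass decomposition (dedup the
-- words once, then index each unique word's distinct k-grams with setdefault+append);
-- same return value, proved equal on the whole domain.

-- ===== PORT A =====
def BigramIndexBuilder (text : List String) (k : Int) : List (String × List String) :=
  (text.foldl (fun (kgrams : PySem.Dict String (List String)) word =>
      (PySem.List.pyRange 0 ((PySem.Str.len word) - k + 1) 1).foldl
        (fun kgrams i =>
          let bigram := PySem.Str.slice word (some i) (some (i + k))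
          let kgrams := if kgrams.contains bigram then kgrams else kgrams.insert bigram ([] : List String)
          if word ∈ kgrams.getD bigram [] then kgrams
          else kgrams.insert bigram (kgrams.getD bigram [] ++ [word]))
        kgrams)
    PySem.Dict.empty).items

-- ===== PORT B =====
def BigramIndexBuilder_alt (text : List String) (k : Int) : List (String × List String) :=
  let uniq := (text.foldl
      (fun (su : PySem.Set String × List String) word =>
        if PySem.Set.contains su.1 word then su
        else (PySem.Set.add su.1 word, su.2 ++ [word]))
      (PySem.Set.empty, [])).2
  (uniq.foldl (fun (kgrams : PySem.Dict String (List String)) word =>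
      (PySem.List.dedup ((PySem.List.pyRange 0 ((PySem.Str.len word) - k + 1) 1).map
          (fun i => PySem.Str.slice word (some i) (some (i + k))))).foldl
        (fun kgrams bigram =>
          let d' := kgrams.setdefault bigram ([] : List String)
          d'.insert bigram (d'.getD bigram [] ++ [word]))
        kgrams)
    PySem.Dict.empty).items

-- ===== PRECONDITION & SPEC =====
def Spec_BigramIndexBuilder (text : List String) (k : Int) (out : List (String × List String)) : Prop := out = BigramIndexBuilder_alt text k
instance (text : List String) (k : Int) (out : List (String × List String)) : Decidable (Spec_BigramIndexBuilder text k out) := by unfold Spec_BigramIndexBuilder; infer_instance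

-- ===== CLAIM (what is proved, stated in full; the proofs are below) =====
def Claim_equal_BigramIndexBuilder : Prop := ∀ (text : List String) (k : Int), Dom_BigramIndexBuilder text k → Spec_BigramIndexBuilder text k (BigramIndexBuilder text k)

-- ===== LEMMAS AND PROOFS =====

-- the list of k-grams of a word, in position order (with repetitions)
def pvBgs (k : Int) (w : String) : List String :=
  (PySem.List.pyRange 0 ((PySem.Str.len w) - k + 1) 1).map
    (fun i => PySem.Str.slice w (some i) (some (i + k)))

-- A's inner-loop body, as a function of the current dict and the bigram
def pvStepA (w : String) (d : PySem.Dict String (List String)) (b : String) :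
    PySem.Dict String (List String) :=
  let d := if d.contains b then d else d.insert b ([] : List String)
  if w ∈ d.getD b [] then d else d.insert b (d.getD b [] ++ [w])

-- B's inner-loop body (setdefault + append)
def pvStepB (w : String) (d : PySem.Dict String (List String)) (b : String) :
    PySem.Dict String (List String) :=
  let d' := d.setdefault b ([] : List String)
  d'.insert b (d'.getD b [] ++ [w])

-- first occurrences of bs that are not already in seen
def pvNewFirsts (seen : List String) : List String → List String
  | [] => []
  | b :: bs => if b ∈ seen then pvNewFirsts seen bs else b :: pvNewFirsts (b :: seen) bs

theorem pvNewFirsts_congr {seen seen' : List String} (bs : List String)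
    (h : ∀ x, x ∈ seen ↔ x ∈ seen') : pvNewFirsts seen bs = pvNewFirsts seen' bs := by
  induction bs generalizing seen seen' with
  | nil => rfl
  | cons b bs ih =>
    simp only [pvNewFirsts]
    by_cases hb : b ∈ seen
    · rw [if_pos hb, if_pos ((h b).mp hb)]; exact ih h
    · rw [if_neg hb, if_neg (fun hc => hb ((h b).mpr hc))]
      congr 1
      exact ih (by intro x; simp [h x])

theorem pv_foldl_add_eq (bs : List String) : ∀ (s : PySem.Set String),
    bs.foldl PySem.Set.add s = s ++ pvNewFirsts s bs := by
  induction bs with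
  | nil => intro s; simp [pvNewFirsts]
  | cons b bs ih =>
    intro s
    simp only [List.foldl_cons, pvNewFirsts]
    by_cases hb : b ∈ s
    · have : PySem.Set.add s b = s := by
        simp [PySem.Set.add, PySem.Set.contains, hb]
      rw [this, if_pos hb, ih]
    · have : PySem.Set.add s b = s ++ [b] := by
        simp [PySem.Set.add, PySem.Set.contains, hb]
      rw [this, if_neg hb, ih]
      rw [pvNewFirsts_congr bs (seen := s ++ [b]) (seen' := b :: s)
        (by intro x; simp only [List.mem_append, List.mem_cons]; tauto)]
      simp

theorem pv_dedup_eq_newFirsts (bs : List String) :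
    PySem.List.dedup bs = pvNewFirsts [] bs := by
  rw [PySem.List.dedup_eq_ofList, PySem.Set.ofList_eq_foldl, pv_foldl_add_eq]
  simp

theorem pv_mem_getD_contains {d : PySem.Dict String (List String)} {b w : String}
    (h : w ∈ d.getD b []) : d.contains b = true := by
  cases hc : d.contains b with
  | true => rfl
  | false => rw [PySem.Dict.getD_of_not_contains d [] hc] at h; simp at h

theorem pvStepA_eq_stepB {w : String} {d : PySem.Dict String (List String)} {b : String}
    (h : w ∉ d.getD b []) : pvStepA w d b = pvStepB w d b := by
  unfold pvStepA pvStepB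
  cases hc : d.contains b with
  | true =>
    rw [PySem.Dict.setdefault_of_contains d _ hc]
    simp only [if_true, if_neg h]
  | false =>
    rw [PySem.Dict.setdefault_of_not_contains d _ hc]
    have h0 : (d.insert b ([] : List String)).getD b [] = [] := by
      simp
    simp only [Bool.false_eq_true, if_false, h0, List.not_mem_nil, List.nil_append]

theorem pvStepA_id {w : String} {d : PySem.Dict String (List String)} {b : String}
    (h : w ∈ d.getD b []) : pvStepA w d b = d := by
  unfold pvStepA
  rw [pv_mem_getD_contains h]
  simp only [if_true, if_pos h]

theorem pv_getD_stepB (w : String) (d : PySem.Dict String (List String)) (b b' : String) :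
    (pvStepB w d b).getD b' [] = if b' = b then d.getD b [] ++ [w] else d.getD b' [] := by
  unfold pvStepB
  by_cases hb : b' = b
  · subst hb
    simp [PySem.Dict.getD_setdefault_self]
  · rw [PySem.Dict.getD_insert, if_neg hb, if_neg hb,
      PySem.Dict.getD_eq_get?_getD, PySem.Dict.get?_setdefault_of_ne d _ hb,
      ← PySem.Dict.getD_eq_get?_getD]

theorem pv_foldA_of_mem {w : String} (bs : List String)
    {d : PySem.Dict String (List String)} (h : ∀ b ∈ bs, w ∈ d.getD b []) :
    bs.foldl (pvStepA w) d = d := by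
  induction bs with
  | nil => rfl
  | cons b bs ih =>
    simp only [List.foldl_cons, pvStepA_id (h b (by simp))]
    exact ih (fun b' hb' => h b' (by simp [hb']))

theorem pv_foldA_eq_foldB {w : String} (bs : List String) :
    ∀ (d : PySem.Dict String (List String)) (seen : List String),
    (∀ b, w ∈ d.getD b [] ↔ b ∈ seen) →
    bs.foldl (pvStepA w) d = (pvNewFirsts seen bs).foldl (pvStepB w) d := by
  induction bs with
  | nil => intro d seen _; rfl
  | cons b bs ih =>
    intro d seen H
    simp only [List.foldl_cons, pvNewFirsts]
    by_cases hb : b ∈ seen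
    · rw [if_pos hb, pvStepA_id ((H b).mpr hb)]
      exact ih d seen H
    · rw [if_neg hb, pvStepA_eq_stepB (fun hm => hb ((H b).mp hm))]
      simp only [List.foldl_cons]
      apply ih
      intro b'
      rw [pv_getD_stepB]
      by_cases hbb : b' = b
      · subst hbb; simp
      · rw [if_neg hbb]; simp [H b', hbb]

theorem pv_getD_foldB {w : String} (bs : List String) (hnd : bs.Nodup) :
    ∀ (d : PySem.Dict String (List String)) (b : String),
    (bs.foldl (pvStepB w) d).getD b [] = d.getD b [] ++ (if b ∈ bs then [w] else []) := by
  induction bs with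
  | nil => intro d b; simp
  | cons b0 bs ih =>
    intro d b
    have hnd' : bs.Nodup := hnd.of_cons
    have hb0 : b0 ∉ bs := by simp at hnd; exact hnd.1
    simp only [List.foldl_cons, ih hnd', pv_getD_stepB]
    by_cases hbb : b = b0
    · subst hbb
      rw [if_pos rfl, if_neg hb0, if_pos List.mem_cons_self]
      simp
    · rw [if_neg hbb]
      by_cases hm : b ∈ bs
      · rw [if_pos hm, if_pos (List.mem_cons_of_mem _ hm)]
      · rw [if_neg hm, if_neg (by simp [hbb, hm])]

-- A's inner loop / B's inner loop over one word
def pvInnerA (k : Int) (d : PySem.Dict String (List String)) (w : String) :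
    PySem.Dict String (List String) := (pvBgs k w).foldl (pvStepA w) d

def pvInnerB (k : Int) (d : PySem.Dict String (List String)) (w : String) :
    PySem.Dict String (List String) := (PySem.List.dedup (pvBgs k w)).foldl (pvStepB w) d

def pvInv (k : Int) (d : PySem.Dict String (List String)) (seen : List String) : Prop :=
  (∀ b w', w' ∈ d.getD b [] → w' ∈ seen) ∧
  (∀ w' ∈ seen, ∀ b ∈ pvBgs k w', w' ∈ d.getD b [])

theorem pv_mainEq (k : Int) (text : List String) :
    ∀ (d : PySem.Dict String (List String)) (seen : List String), pvInv k d seen →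
    text.foldl (pvInnerA k) d = (pvNewFirsts seen text).foldl (pvInnerB k) d := by
  induction text with
  | nil => intro d seen _; rfl
  | cons w text ih =>
    intro d seen hInv
    simp only [List.foldl_cons, pvNewFirsts]
    by_cases hw : w ∈ seen
    · rw [if_pos hw]
      have : pvInnerA k d w = d := pv_foldA_of_mem _ (hInv.2 w hw)
      rw [this]
      exact ih d seen hInv
    · rw [if_neg hw]
      have hfresh : ∀ b, w ∈ d.getD b [] ↔ b ∈ ([] : List String) := by
        intro b
        simp only [List.not_mem_nil, iff_false]
        exact fun hm => hw (hInv.1 b w hm)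
      have hAB : pvInnerA k d w = pvInnerB k d w := by
        unfold pvInnerA pvInnerB
        rw [pv_foldA_eq_foldB _ d [] hfresh, pv_dedup_eq_newFirsts]
      rw [hAB]
      simp only [List.foldl_cons]
      apply ih
      have hchar : ∀ b, (pvInnerB k d w).getD b [] =
          d.getD b [] ++ (if b ∈ PySem.List.dedup (pvBgs k w) then [w] else []) := by
        intro b
        exact pv_getD_foldB _ (PySem.List.nodup_dedup _) d b
      constructor
      · intro b w' hm
        rw [hchar b] at hm
        rcases List.mem_append.mp hm with h1 | h2
        · exact List.mem_cons_of_mem _ (hInv.1 b w' h1)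
        · split at h2
          · simp at h2; rw [h2]; exact List.mem_cons_self
          · simp at h2
      · intro w' hw' b hb
        rw [hchar b]
        rcases List.mem_cons.mp hw' with h1 | h2
        · rw [h1] at hb ⊢
          have : b ∈ PySem.List.dedup (pvBgs k w) := by
            rw [PySem.List.dedup_eq_ofList]
            exact (PySem.Set.mem_ofList _ _).mpr hb
          rw [if_pos this]; simp
        · exact List.mem_append_left _ (hInv.2 w' h2 b hb)

theorem pv_uniqEq (text : List String) :
    ∀ (s : PySem.Set String) (u : List String), (∀ x, x ∈ s ↔ x ∈ u) →
    (text.foldl (fun (su : PySem.Set String × List String) word =>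
        if PySem.Set.contains su.1 word then su
        else (PySem.Set.add su.1 word, su.2 ++ [word])) (s, u)).2
      = u ++ pvNewFirsts u text := by
  induction text with
  | nil => intro s u _; simp [pvNewFirsts]
  | cons w text ih =>
    intro s u H
    simp only [List.foldl_cons, pvNewFirsts]
    by_cases hw : w ∈ u
    · have hc : PySem.Set.contains s w = true := by
        simp [PySem.Set.contains, (H w).mpr hw]
      rw [hc, if_pos hw]
      simpa using ih s u H
    · have hc : PySem.Set.contains s w = false := by
        simp [PySem.Set.contains]
        exact fun hm => hw ((H w).mp hm)
      rw [hc, if_neg hw]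
      simp only [Bool.false_eq_true, if_false]
      rw [ih (PySem.Set.add s w) (u ++ [w])
        (by intro x
            rw [PySem.Set.mem_add, H x]
            simp only [List.mem_append, List.mem_singleton])]
      rw [pvNewFirsts_congr text (seen := u ++ [w]) (seen' := w :: u)
        (by intro x; simp only [List.mem_append, List.mem_cons]; tauto)]
      simp

theorem pv_A_eq (text : List String) (k : Int) :
    BigramIndexBuilder text k = (text.foldl (pvInnerA k) PySem.Dict.empty).items := by
  unfold BigramIndexBuilder pvInnerA pvBgs pvStepA
  congr 1
  apply PySem.List.foldl_congr_mem
  intro d w _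
  rw [List.foldl_map]

theorem pv_B_eq (text : List String) (k : Int) :
    BigramIndexBuilder_alt text k =
      ((pvNewFirsts [] text).foldl (pvInnerB k) PySem.Dict.empty).items := by
  unfold BigramIndexBuilder_alt pvInnerB pvBgs pvStepB
  rw [pv_uniqEq text PySem.Set.empty [] (by intro x; simp [PySem.Set.empty])]
  simp

-- ===== VERDICT (by name: the statement is the Claim_ definition above) =====
theorem BigramIndexBuilder_spec : Claim_equal_BigramIndexBuilder := by
  intro text k _
  unfold Spec_BigramIndexBuilder
  rw [pv_A_eq, pv_B_eq]
  congr 1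
  apply pv_mainEq
  constructor
  · intro b w' hm
    simp [PySem.Dict.getD_empty] at hm
  · intro w' hw'
    simp at hw'
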